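-- pv_equiv track=rewrite | github.com/LeanderVonSeelstrang/Scilab-RL | src/custom_envs/moonlander/helper_functions.py | create_dict_of_world_walls
-- ===== SOURCE A (Python) =====
-- from typing import List, Dict, Tuple
--
-- def create_dict_of_world_walls(
--         list_of_free_ranges: List[List[int]],
--         world_y_height: int = 2100,
--         world_x_width: int = 80,
--         agent_size: int = 1,
--         no_crashes: bool = False,
-- ) -> Dict[str, List[int]]:
--     """
--     creates a dict with every y in the world as a key, the value of each key describes where the wall is,
--     when it is [0, observation_space_x], there is no funnel, smaller values indicate a funnel
--     Args:
--         list_of_free_ranges: list of two-element lists with starting and ending free range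
--         world_y_height: height of world
--         world_x_width: width of the world (excluding walls)
--         agent_size: size of the agent
--         no_crashes: defines whether the agent should be able to crash into a wall and obstacles (if yes: create funnels, otherwise not)
--
--     Returns: dict with every y value and its corresponding wall value
--
--     """
--     wall_dict = dict()
--     if not no_crashes:
--         for free_range in list_of_free_ranges:
--             # the funnel gets smaller and wider in the complete free range
--             # the lengths of the funnel indicates one of this cones
--             lengths_of_funnel = int((len(range(free_range[0], free_range[1]))) / 2)
--             current_wall_change_number = 0
--             counter = 0
--             count_same_size = 0
--
--             for index in range(free_range[0], free_range[1]):
--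
--                 # x and y value of the wall
--                 wall_dict[str(index)] = [
--                     0 + current_wall_change_number,
--                     world_x_width + 1 - current_wall_change_number,
--                 ]
--
--                 # check if the funnel should get smaller or wider
--                 if counter < lengths_of_funnel:
--                     # this if prevents from making the funnel too small --> the agent still has to pass
--                     if len(
--                             range(
--                                 current_wall_change_number,
--                                 world_x_width + 1 - current_wall_change_number,
--                             )
--                     ) >= (agent_size + 2):
--                         current_wall_change_number += 1
--                     else:
--                         count_same_size += 1
--                 else:
--                     # this if prevents from making the funnel two small --> the agent still has to pass
--                     if count_same_size > 0:
--                         count_same_size -= 1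
--                     else:
--                         current_wall_change_number -= 1
--
--                 counter += 1
--
--     # create dict entry for all y values that are not covered in the free ranges
--     for index in range(1, world_y_height + 1):
--         if str(index) not in wall_dict:
--             wall_dict[str(index)] = [0, world_x_width + 1]
--
--     # sorting
--     wall_dict_int_keys = {int(k): v for k, v in wall_dict.items()}
--     sorted_wall_dict = dict()
--     for wall_tuple in sorted(wall_dict_int_keys.items()):
--         sorted_wall_dict[str(wall_tuple[0])] = wall_tuple[1]
--
--     return sorted_wall_dict
-- ===== SOURCE B (Python) =====
-- def create_dict_of_world_walls(
--         list_of_free_ranges,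
--         world_y_height=2100,
--         world_x_width=80,
--         agent_size=1,
--         no_crashes=False,
-- ):
--     # Compute each funnel row's wall value in closed form (the funnel narrows by
--     # one per row up to a cap leaving room for the agent, then widens back), and
--     # emit the rows directly in key order: keys below the window, 1..height,
--     # keys above — so no sort over the whole height is needed.
--     funnel = {}
--     if not no_crashes:
--         cap = max(0, (world_x_width - 1 - agent_size) // 2 + 1)
--         for free_range in list_of_free_ranges:
--             start, stop = free_range[0], free_range[1]
--             n = max(0, stop - start)
--             half = n // 2
--             narrowest = min(half, cap)
--             stuck = half - narrowest
--             for j in range(n):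
--                 if j < half:
--                     c = min(j, cap)
--                 else:
--                     c = narrowest - max(0, j - half - stuck)
--                 funnel[start + j] = [c, world_x_width + 1 - c]
--     below = sorted(k for k in funnel if k < 1)
--     above = sorted(k for k in funnel if k > max(0, world_y_height))
--     result = {}
--     for k in below:
--         result[str(k)] = funnel[k]
--     for k in range(1, world_y_height + 1):
--         result[str(k)] = funnel.get(k, [0, world_x_width + 1])
--     for k in above:
--         result[str(k)] = funnel[k]
--     return result
-- ===== Notes on version B (the rewrite author's own statement) =====
-- stated objective: faster
-- what changed: B replaces A's per-row counter simulation by a closed-form wall value per row and builds the result directly in key order (keys below the window, 1..height, keys above), so only the few out-of-window funnel keys are ever sorted instead of A's sort over all height+funnel keys; Pre_ excludes free ranges with fewer than two elements (A raises IndexError) and negative agent_size, which is outside the natural domain of a size parameter (there A's width check degenerates and the funnel narrows without bound).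
import Mathlib
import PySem

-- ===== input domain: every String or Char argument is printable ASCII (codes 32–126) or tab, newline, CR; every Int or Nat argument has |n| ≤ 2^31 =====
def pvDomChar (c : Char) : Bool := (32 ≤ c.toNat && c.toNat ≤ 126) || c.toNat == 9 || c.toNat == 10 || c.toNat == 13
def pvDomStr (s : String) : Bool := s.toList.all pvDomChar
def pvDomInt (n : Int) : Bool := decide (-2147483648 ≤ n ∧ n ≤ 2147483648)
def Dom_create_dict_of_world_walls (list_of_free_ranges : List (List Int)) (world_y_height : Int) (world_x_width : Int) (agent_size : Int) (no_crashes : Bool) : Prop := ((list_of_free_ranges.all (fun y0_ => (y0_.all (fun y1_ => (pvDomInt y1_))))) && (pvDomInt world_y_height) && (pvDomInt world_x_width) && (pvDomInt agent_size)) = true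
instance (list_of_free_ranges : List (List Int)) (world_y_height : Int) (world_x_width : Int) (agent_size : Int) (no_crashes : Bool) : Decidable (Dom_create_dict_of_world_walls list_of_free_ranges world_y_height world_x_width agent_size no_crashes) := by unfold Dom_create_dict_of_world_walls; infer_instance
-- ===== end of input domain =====

-- B replaces A's per-row counter simulation by a closed-form wall value and emits the
-- result directly in key order (keys < 1, then 1..height, then keys above), sorting only
-- the out-of-window funnel keys.

-- ===== PORT A =====

-- int(k) ported by hand: exact for the strings this program feeds it, which are all
-- produced by str(n) (an optional '-' followed by decimal digits, no spaces/'+'/'_').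
def pvParseDigits (ds : List Char) : Int :=
  ds.foldl (fun a c => 10 * a + ((c.toNat : Int) - 48)) 0

def pvIntOfStr (s : String) : Int :=
  if s.toList.head? = some '-' then -(pvParseDigits s.toList.tail) else pvParseDigits s.toList

-- body of A's inner `for index in range(free_range[0], free_range[1])` loop;
-- state = (wall_dict, current_wall_change_number, counter, count_same_size)
def aInner (world_x_width agent_size lengths_of_funnel : Int)
    (st : PySem.Dict String (List Int) × Int × Int × Int) (index : Int) :
    PySem.Dict String (List Int) × Int × Int × Int :=
  match st with
  | (d, c, counter, css) =>
    let d := d.insert (PySem.Int.toStr index) [0 + c, world_x_width + 1 - c]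
    if counter < lengths_of_funnel then
      if PySem.List.len (PySem.List.pyRange c (world_x_width + 1 - c) 1) ≥ agent_size + 2 then
        (d, c + 1, counter + 1, css)
      else
        (d, c, counter + 1, css + 1)
    else
      if css > 0 then (d, c, counter + 1, css - 1)
      else (d, c - 1, counter + 1, css)

-- body of A's `for free_range in list_of_free_ranges` loop
def aRange (world_x_width agent_size : Int) (d : PySem.Dict String (List Int))
    (free_range : List Int) : PySem.Dict String (List Int) :=
  let a := PySem.List.pyGetD free_range 0 0    -- free_range[0]; in range under Pre_
  let b := PySem.List.pyGetD free_range 1 0    -- free_range[1]; in range under Pre_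
  -- int(len(range(a, b)) / 2): the length is ≥ 0, so this is floor division by 2 (floats exact)
  let lengths_of_funnel := PySem.Int.floordiv (PySem.List.len (PySem.List.pyRange a b 1)) 2
  ((PySem.List.pyRange a b 1).foldl (aInner world_x_width agent_size lengths_of_funnel)
    (d, 0, 0, 0)).1

def create_dict_of_world_walls (list_of_free_ranges : List (List Int)) (world_y_height : Int)
    (world_x_width : Int) (agent_size : Int) (no_crashes : Bool) : List (String × List Int) :=
  let wall_dict : PySem.Dict String (List Int) :=
    if !no_crashes then
      list_of_free_ranges.foldl (aRange world_x_width agent_size) PySem.Dict.empty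
    else PySem.Dict.empty
  let wall_dict := (PySem.List.pyRange 1 (world_y_height + 1) 1).foldl
    (fun d index =>
      if d.contains (PySem.Int.toStr index) then d
      else d.insert (PySem.Int.toStr index) [0, world_x_width + 1]) wall_dict
  let wall_dict_int_keys := wall_dict.items.foldl
    (fun d p => d.insert (pvIntOfStr p.1) p.2)
    (PySem.Dict.empty : PySem.Dict Int (List Int))
  -- sorted(wall_dict_int_keys.items()): the keys are distinct, so Python's lexicographic
  -- tuple sort never reaches the second component; it is exactly a sort by key
  let sorted_items := PySem.List.sorted wall_dict_int_keys.items (fun p => p.1) false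
  (sorted_items.foldl (fun d p => d.insert (PySem.Int.toStr p.1) p.2)
    (PySem.Dict.empty : PySem.Dict String (List Int))).items

-- ===== PORT B =====

-- body of B's `for free_range in list_of_free_ranges` loop: closed-form wall value per row
def bRange (world_x_width : Int) (cap : Int) (d : PySem.Dict Int (List Int))
    (free_range : List Int) : PySem.Dict Int (List Int) :=
  let start := PySem.List.pyGetD free_range 0 0    -- free_range[0]; in range under Pre_
  let stop := PySem.List.pyGetD free_range 1 0     -- free_range[1]; in range under Pre_
  let n := max 0 (stop - start)
  let half := PySem.Int.floordiv n 2
  let narrowest := min half cap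
  let stuck := half - narrowest
  (PySem.List.pyRange 0 n 1).foldl (fun d j =>
    let c := if j < half then min j cap else narrowest - max 0 (j - half - stuck)
    d.insert (start + j) [c, world_x_width + 1 - c]) d

def create_dict_of_world_walls_alt (list_of_free_ranges : List (List Int)) (world_y_height : Int)
    (world_x_width : Int) (agent_size : Int) (no_crashes : Bool) : List (String × List Int) :=
  let funnel : PySem.Dict Int (List Int) :=
    if !no_crashes then
      let cap := max 0 (PySem.Int.floordiv (world_x_width - 1 - agent_size) 2 + 1)
      list_of_free_ranges.foldl (bRange world_x_width cap) PySem.Dict.empty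
    else PySem.Dict.empty
  let below := PySem.List.sorted (funnel.keys.filter (fun k => decide (k < 1))) (fun k => k) false
  let above := PySem.List.sorted
    (funnel.keys.filter (fun k => decide (k > max 0 world_y_height))) (fun k => k) false
  let result := below.foldl
    (fun d k => d.insert (PySem.Int.toStr k) (funnel.getD k []))    -- funnel[k]: k is a key
    (PySem.Dict.empty : PySem.Dict String (List Int))
  let result := (PySem.List.pyRange 1 (world_y_height + 1) 1).foldl
    (fun d k => d.insert (PySem.Int.toStr k) (funnel.getD k [0, world_x_width + 1])) result
  let result := above.foldl
    (fun d k => d.insert (PySem.Int.toStr k) (funnel.getD k []))    -- funnel[k]: k is a key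
    result
  result.items

-- ===== PRECONDITION & SPEC =====

-- When no_crashes is false, Pre_ excludes (a) free ranges with fewer than two elements, on
-- which A raises IndexError, and (b) negative agent_size, which is outside the natural
-- domain of a size parameter (there A's width check compares a clamped-at-zero range length
-- against a nonpositive requirement, so the funnel narrows without bound — an artefact of
-- the implementation, not a specified behaviour).
def Pre_create_dict_of_world_walls (list_of_free_ranges : List (List Int)) (world_y_height : Int)
    (world_x_width : Int) (agent_size : Int) (no_crashes : Bool) : Prop :=
  no_crashes = true ∨ (0 ≤ agent_size ∧ ∀ fr ∈ list_of_free_ranges, 2 ≤ fr.length)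

instance (list_of_free_ranges : List (List Int)) (world_y_height : Int) (world_x_width : Int) (agent_size : Int) (no_crashes : Bool) : Decidable (Pre_create_dict_of_world_walls list_of_free_ranges world_y_height world_x_width agent_size no_crashes) := by unfold Pre_create_dict_of_world_walls; infer_instance

def pvWitness_create_dict_of_world_walls : List (List Int) × Int × Int × Int × Bool :=
  ([[1, 4], [-2, 3]], 5, 6, 1, false)

def Spec_create_dict_of_world_walls (list_of_free_ranges : List (List Int)) (world_y_height : Int) (world_x_width : Int) (agent_size : Int) (no_crashes : Bool) (out : List (String × List Int)) : Prop := out = create_dict_of_world_walls_alt list_of_free_ranges world_y_height world_x_width agent_size no_crashes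
instance (list_of_free_ranges : List (List Int)) (world_y_height : Int) (world_x_width : Int) (agent_size : Int) (no_crashes : Bool) (out : List (String × List Int)) : Decidable (Spec_create_dict_of_world_walls list_of_free_ranges world_y_height world_x_width agent_size no_crashes out) := by unfold Spec_create_dict_of_world_walls; infer_instance

-- ===== CLAIM (what is proved, stated in full; the proofs are below) =====
def Claim_equal_create_dict_of_world_walls : Prop := ∀ (list_of_free_ranges : List (List Int)) (world_y_height : Int) (world_x_width : Int) (agent_size : Int) (no_crashes : Bool), Dom_create_dict_of_world_walls list_of_free_ranges world_y_height world_x_width agent_size no_crashes → Pre_create_dict_of_world_walls list_of_free_ranges world_y_height world_x_width agent_size no_crashes → Spec_create_dict_of_world_walls list_of_free_ranges world_y_height world_x_width agent_size no_crashes (create_dict_of_world_walls list_of_free_ranges world_y_height world_x_width agent_size no_crashes)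

-- ===== LEMMAS AND PROOFS =====

theorem pd_append (xs : List Char) (c : Char) :
    pvParseDigits (xs ++ [c]) = 10 * pvParseDigits xs + ((c.toNat : Int) - 48) := by
  simp [pvParseDigits]

theorem digitChar_toNat (d : Nat) (h : d < 10) : ((Nat.digitChar d).toNat : Int) - 48 = d := by
  interval_cases d <;> decide

theorem pd_toDigits (m : Nat) : pvParseDigits (Nat.toDigits 10 m) = (m : Int) := by
  induction m using Nat.strong_induction_on with
  | _ m ih =>
    rw [Nat.toDigits_eq_if (by norm_num)]
    split
    · next h =>
      have h2 := digitChar_toNat m h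
      simp [pvParseDigits] at h2 ⊢
      omega
    · next h =>
      rw [pd_append, ih (m / 10) (by omega), digitChar_toNat _ (by omega)]
      omega

theorem toDigits_head_digit (m : Nat) : (Nat.toDigits 10 m).head? ≠ some '-' := by
  have hlen : 0 < (Nat.toDigits 10 m).length := Nat.length_toDigits_pos
  cases hd : (Nat.toDigits 10 m).head? with
  | none => simp
  | some c =>
    have hc : c ∈ Nat.toDigits 10 m := List.mem_of_mem_head? hd
    have := Nat.isDigit_of_mem_toDigits (by norm_num) (by norm_num) hc
    intro h; cases h; simp_all [Char.isDigit]

theorem pvIntOfStr_toStr (n : Int) : pvIntOfStr (PySem.Int.toStr n) = n := by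
  unfold pvIntOfStr
  rw [PySem.Int.toList_toStr]
  unfold PySem.Int.toChars
  split
  · next h =>
    rw [List.head?_cons, if_pos rfl, List.tail_cons, pd_toDigits]
    omega
  · next h =>
    rw [if_neg (toDigits_head_digit _)]
    rw [pd_toDigits]
    omega

theorem toStr_inj {a b : Int} (h : PySem.Int.toStr a = PySem.Int.toStr b) : a = b := by
  have := congrArg pvIntOfStr h
  rwa [pvIntOfStr_toStr, pvIntOfStr_toStr] at this

def mapd (d : PySem.Dict Int (List Int)) : PySem.Dict String (List Int) :=
  PySem.Dict.mk (d.items.map (fun p => (PySem.Int.toStr p.1, p.2)))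

theorem mapd_items (d : PySem.Dict Int (List Int)) :
    (mapd d).items = d.items.map (fun p => (PySem.Int.toStr p.1, p.2)) := rfl

theorem mapd_keys (d : PySem.Dict Int (List Int)) :
    (mapd d).keys = d.keys.map PySem.Int.toStr := by
  simp only [PySem.Dict.keys, mapd_items, List.map_map]; rfl

theorem mapd_contains (d : PySem.Dict Int (List Int)) (k : Int) :
    (mapd d).contains (PySem.Int.toStr k) = d.contains k := by
  rw [PySem.Dict.contains_eq_decide_mem_keys, PySem.Dict.contains_eq_decide_mem_keys, mapd_keys]
  simp only [List.mem_map, decide_eq_decide]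
  constructor
  · rintro ⟨a, ha, h⟩; rwa [toStr_inj h] at ha
  · exact fun h => ⟨k, h, rfl⟩

theorem mapd_insert (d : PySem.Dict Int (List Int)) (k : Int) (v : List Int) :
    mapd (d.insert k v) = (mapd d).insert (PySem.Int.toStr k) v := by
  apply PySem.Dict.ext
  rw [mapd_items, PySem.Dict.items_insert, PySem.Dict.items_insert, mapd_contains]
  split
  · rw [mapd_items, List.map_map, List.map_map]
    apply List.map_congr_left
    intro p _
    simp only [Function.comp]
    by_cases hp : p.1 == k
    · simp [hp]
      simp at hp
      simp [hp]
    · simp at hp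
      have : (PySem.Int.toStr p.1 == PySem.Int.toStr k) = false := by
        simp only [beq_eq_false_iff_ne, ne_eq]
        intro h; exact hp (toStr_inj h)
      simp [this, beq_eq_false_iff_ne.mpr hp]
  · simp [mapd_items]

-- ghost: A's inner loop with Int keys instead of str(index) keys
def gInner (world_x_width agent_size lengths_of_funnel : Int)
    (st : PySem.Dict Int (List Int) × Int × Int × Int) (index : Int) :
    PySem.Dict Int (List Int) × Int × Int × Int :=
  match st with
  | (d, c, counter, css) =>
    let d := d.insert index [0 + c, world_x_width + 1 - c]
    if counter < lengths_of_funnel then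
      if PySem.List.len (PySem.List.pyRange c (world_x_width + 1 - c) 1) ≥ agent_size + 2 then
        (d, c + 1, counter + 1, css)
      else
        (d, c, counter + 1, css + 1)
    else
      if css > 0 then (d, c, counter + 1, css - 1)
      else (d, c - 1, counter + 1, css)

theorem aInner_mapd (W ag L : Int) (d : PySem.Dict Int (List Int)) (c k s : Int) (i : Int) :
    aInner W ag L (mapd d, c, k, s) i =
      ((mapd (gInner W ag L (d, c, k, s) i).1), (gInner W ag L (d, c, k, s) i).2) := by
  simp only [aInner, gInner, ← mapd_insert]
  split_ifs <;> rfl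

theorem foldl_aInner_mapd (W ag L : Int) (l : List Int) :
    ∀ (d : PySem.Dict Int (List Int)) (c k s : Int),
      l.foldl (aInner W ag L) (mapd d, c, k, s) =
        ((mapd (l.foldl (gInner W ag L) (d, c, k, s)).1), (l.foldl (gInner W ag L) (d, c, k, s)).2) := by
  induction l with
  | nil => intro d c k s; rfl
  | cons x xs ih =>
    intro d c k s
    simp only [List.foldl_cons, aInner_mapd]
    obtain ⟨d', c', k', s'⟩ := gInner W ag L (d, c, k, s) x
    exact ih d' c' k' s'

def gRange (world_x_width agent_size : Int) (d : PySem.Dict Int (List Int))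
    (free_range : List Int) : PySem.Dict Int (List Int) :=
  let a := PySem.List.pyGetD free_range 0 0
  let b := PySem.List.pyGetD free_range 1 0
  let lengths_of_funnel := PySem.Int.floordiv (PySem.List.len (PySem.List.pyRange a b 1)) 2
  ((PySem.List.pyRange a b 1).foldl (gInner world_x_width agent_size lengths_of_funnel)
    (d, 0, 0, 0)).1

theorem aRange_mapd (W ag : Int) (d : PySem.Dict Int (List Int)) (fr : List Int) :
    aRange W ag (mapd d) fr = mapd (gRange W ag d fr) := by
  simp only [aRange, gRange]
  rw [foldl_aInner_mapd]

theorem foldl_aRange_mapd (W ag : Int) (rs : List (List Int)) :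
    ∀ d, rs.foldl (aRange W ag) (mapd d) = mapd (rs.foldl (gRange W ag) d) := by
  induction rs with
  | nil => intro d; rfl
  | cons r rs ih => intro d; simp only [List.foldl_cons, aRange_mapd]; exact ih _

def cBF (half cap : Int) (j : Int) : Int :=
  if j < half then min j cap else min half cap - max 0 (j - half - (half - min half cap))

def cssFF (half cap : Int) (j : Int) : Int :=
  if j < half then j - min j cap else max 0 ((half - min half cap) - (j - half))

theorem gfold (W ag half cap q a : Int) (hhalf : 0 ≤ half)
    (hag : 0 < ag + 2) (hq1 : 2 * q ≤ W - 1 - ag) (hq2 : W - 1 - ag ≤ 2 * q + 1)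
    (hcap : cap = max 0 (q + 1))
    (d : PySem.Dict Int (List Int)) :
    ∀ k : Nat,
      (List.range k).foldl (fun st (t : Nat) => gInner W ag half st (a + (t : Int))) (d, 0, 0, 0) =
        ((List.range k).foldl
            (fun dd (t : Nat) => dd.insert (a + (t : Int))
              [cBF half cap (t : Int), W + 1 - cBF half cap (t : Int)]) d,
          cBF half cap (k : Int), (k : Int), cssFF half cap (k : Int)) := by
  have hcap0 : 0 ≤ cap := by omega
  intro k
  induction k with
  | zero =>
    simp only [List.range_zero, List.foldl_nil, Nat.cast_zero]
    refine Prod.ext rfl ?_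
    simp only [cBF, cssFF]
    split_ifs <;> simp_all <;> omega
  | succ k ih =>
    rw [List.range_succ, List.foldl_append, List.foldl_append, ih]
    simp only [List.foldl_cons, List.foldl_nil, gInner,
      PySem.List.len_eq, PySem.List.length_pyRange_one]
    push_cast
    split_ifs with h1 h2 h3 <;>
      refine Prod.ext ?_ (Prod.ext ?_ (Prod.ext ?_ ?_)) <;>
      simp only [cBF, cssFF, zero_add] at * <;>
      split_ifs at * <;>
      first
        | rfl
        | omega

theorem gRange_eq_bRange (W ag : Int) (hag : 0 ≤ ag) (d : PySem.Dict Int (List Int)) (fr : List Int) :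
    gRange W ag d fr
      = bRange W (max 0 (PySem.Int.floordiv (W - 1 - ag) 2 + 1)) d fr := by
  simp only [gRange, bRange]
  set a := PySem.List.pyGetD fr 0 0 with ha
  set b := PySem.List.pyGetD fr 1 0 with hb
  set n := max 0 (b - a) with hn
  have hlen : PySem.List.len (PySem.List.pyRange a b 1) = n := by
    simp [PySem.List.len_eq, PySem.List.length_pyRange_one, hn]; omega
  rw [hlen]
  set half := PySem.Int.floordiv n 2 with hhalf
  set cap := max 0 (PySem.Int.floordiv (W - 1 - ag) 2 + 1) with hcap
  have hhalf0 : 0 ≤ half := by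
    rw [hhalf]
    have := PySem.Int.floordiv_eq_ediv_of_pos (a := n) (b := 2) (by omega)
    omega
  have hq := PySem.Int.floordiv_mul_add_mod (W - 1 - ag) 2
  have hq1 := PySem.Int.mod_nonneg (W - 1 - ag) (b := 2) (by omega)
  have hq2 := PySem.Int.mod_lt (W - 1 - ag) (b := 2) (by omega)
  -- rewrite both folds over List.range
  rw [PySem.List.pyRange_one a b, PySem.List.pyRange_one 0 n, List.foldl_map, List.foldl_map]
  have hN : (b - a).toNat = (n - 0).toNat := by omega
  rw [hN]
  rw [gfold W ag half cap (PySem.Int.floordiv (W - 1 - ag) 2) a hhalf0 (by omega)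
    (by omega) (by omega) hcap d ((n - 0).toNat)]
  simp only [cBF, zero_add]

def gFill (W : Int) (d : PySem.Dict Int (List Int)) (k : Int) : PySem.Dict Int (List Int) :=
  if d.contains k then d else d.insert k [0, W + 1]

theorem fill_mapd (W : Int) (l : List Int) :
    ∀ d : PySem.Dict Int (List Int),
      l.foldl (fun d idx =>
        if d.contains (PySem.Int.toStr idx) then d
        else d.insert (PySem.Int.toStr idx) [0, W + 1]) (mapd d) =
      mapd (l.foldl (gFill W) d) := by
  induction l with
  | nil => intro d; rfl
  | cons x xs ih =>
    intro d
    simp only [List.foldl_cons, gFill, mapd_contains, ← mapd_insert]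
    split_ifs <;> exact ih _

theorem fill_items (W : Int) (l : List Int) :
    ∀ d : PySem.Dict Int (List Int), l.Nodup →
      (l.foldl (gFill W) d).items
        = d.items ++ (l.filter (fun k => !d.contains k)).map (fun k => (k, [0, W + 1])) := by
  induction l with
  | nil => intro d _; simp
  | cons x xs ih =>
    intro d hnd
    simp only [List.foldl_cons, gFill, List.filter_cons]
    rcases List.nodup_cons.mp hnd with ⟨hx, hxs⟩
    by_cases hc : d.contains x
    · rw [if_pos hc, if_neg (by simp [hc]), ih d hxs]
    · rw [if_neg hc, if_pos (by simp [hc]), ih _ hxs,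
        PySem.Dict.items_insert_of_not_contains _ _ (by simp [hc])]
      have hfilter : xs.filter (fun k => !(d.insert x [0, W + 1]).contains k)
          = xs.filter (fun k => !d.contains k) := by
        apply List.filter_congr
        intro k hk
        rw [PySem.Dict.contains_insert]
        have : (k == x) = false := by simp; rintro rfl; exact hx hk
        simp [this]
      rw [hfilter]
      simp

theorem pairwise_lt_of_le_nodup {l : List Int} (hle : l.Pairwise (· ≤ ·)) (hnd : l.Nodup) :
    l.Pairwise (· < ·) :=
  (hle.and hnd).imp fun h => lt_of_le_of_ne h.1 h.2

theorem nodup_keys_bRange (W cap : Int) (d : PySem.Dict Int (List Int)) (fr : List Int)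
    (h : d.keys.Nodup) : (bRange W cap d fr).keys.Nodup := by
  simp only [bRange]
  exact PySem.Dict.nodup_keys_foldl_insert_key _ _ _ _ h

theorem nodup_keys_foldl_bRange (W cap : Int) (rs : List (List Int)) :
    ∀ d : PySem.Dict Int (List Int), d.keys.Nodup → (rs.foldl (bRange W cap) d).keys.Nodup := by
  induction rs with
  | nil => exact fun d h => h
  | cons r rs ih => exact fun d h => ih _ (nodup_keys_bRange W cap d r h)

theorem rebuild (X : PySem.Dict Int (List Int)) (h : X.keys.Nodup) :
    X.items.foldl (fun d p => d.insert p.1 p.2) PySem.Dict.empty = X := by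
  apply PySem.Dict.ext
  rw [PySem.Dict.items_foldl_insert_fresh X.items (fun p => p.1) (fun p => p.2) _
    (fun a _ => PySem.Dict.contains_empty _) h]
  simp only [List.nil_append, show (PySem.Dict.empty : PySem.Dict Int (List Int)).items = [] from rfl]
  simp

theorem sorted_eq_keys (F : PySem.Dict Int (List Int)) (hnd : F.keys.Nodup) (h W : Int) :
    PySem.List.sorted ((PySem.List.pyRange 1 (h + 1) 1).foldl (gFill W) F).items
        (fun p => p.1) false
      = ((PySem.List.sorted (F.keys.filter (fun k => decide (k < 1))) (fun k => k) false)
          ++ PySem.List.pyRange 1 (h + 1) 1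
          ++ (PySem.List.sorted (F.keys.filter (fun k => decide (k > max 0 h)))
              (fun k => k) false)).map
            (fun k => (k, if F.contains k then F.getD k [] else [0, W + 1])) := by
  set valPair : Int → Int × List Int :=
    fun k => (k, if F.contains k then F.getD k [] else [0, W + 1]) with hvp
  set RF := PySem.List.pyRange 1 (h + 1) 1 with hRF
  set RFfil := RF.filter (fun k => !F.contains k) with hRFfil
  set lows := PySem.List.sorted (F.keys.filter (fun k => decide (k < 1))) (fun k => k) false with hlows
  set highs := PySem.List.sorted (F.keys.filter (fun k => decide (k > max 0 h)))
    (fun k => k) false with hhighs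
  have hnRF : RF.Nodup := PySem.List.nodup_pyRange_one 1 (h + 1)
  have hmRF : ∀ k : Int, k ∈ RF ↔ 1 ≤ k ∧ k < h + 1 := fun k => PySem.List.mem_pyRange_one
  have hmlow : ∀ k : Int, k ∈ lows ↔ k ∈ F.keys ∧ k < 1 := by
    intro k; rw [hlows, PySem.List.mem_sorted]; simp [List.mem_filter]
  have hmhigh : ∀ k : Int, k ∈ highs ↔ k ∈ F.keys ∧ max 0 h < k := by
    intro k; rw [hhighs, PySem.List.mem_sorted]; simp [List.mem_filter]
  have hmfil : ∀ k : Int, k ∈ RFfil ↔ (1 ≤ k ∧ k < h + 1) ∧ k ∉ F.keys := by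
    intro k
    rw [hRFfil, List.mem_filter, hmRF]
    simp only [Bool.not_eq_true', ← Bool.not_eq_true, PySem.Dict.contains_iff_mem_keys]
  have hnlow : lows.Nodup := ((PySem.List.sorted_perm _ _ _).nodup_iff).mpr (hnd.filter _)
  have hnhigh : highs.Nodup := ((PySem.List.sorted_perm _ _ _).nodup_iff).mpr (hnd.filter _)
  have hnfil : RFfil.Nodup := hnRF.filter _
  have hnKR : (lows ++ RF ++ highs).Nodup := by
    rw [List.nodup_append, List.nodup_append]
    refine ⟨⟨hnlow, hnRF, ?_⟩, hnhigh, ?_⟩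
    · intro a ha b hb
      rw [hmlow] at ha; rw [hmRF] at hb; omega
    · intro a ha b hb
      rw [hmhigh] at hb
      rcases (List.mem_append).mp ha with h' | h'
      · rw [hmlow] at h'; omega
      · rw [hmRF] at h'; omega
  have hnKL : (F.keys ++ RFfil).Nodup := by
    rw [List.nodup_append]
    refine ⟨hnd, hnfil, ?_⟩
    intro a ha b hb
    rw [hmfil] at hb
    rintro rfl
    exact hb.2 ha
  have hperm : (lows ++ RF ++ highs).Perm (F.keys ++ RFfil) := by
    apply List.perm_of_nodup_nodup_toFinset_eq hnKR hnKL
    ext k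
    simp only [List.toFinset_append, Finset.mem_union, List.mem_toFinset, hmlow, hmhigh, hmfil, hmRF]
    by_cases hk : k ∈ F.keys <;> simp [hk] <;> omega
  have hitems : ((PySem.List.pyRange 1 (h + 1) 1).foldl (gFill W) F).items
      = (F.keys ++ RFfil).map valPair := by
    rw [fill_items W _ F hnRF, List.map_append]
    congr 1
    · rw [PySem.Dict.items_eq_map_keys F hnd []]
      apply List.map_congr_left
      intro k hk
      rw [hvp]
      simp [(PySem.Dict.contains_iff_mem_keys F k).mpr hk]
    · apply List.map_congr_left
      intro k hk
      rw [hmfil] at hk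
      rw [hvp]
      have : F.contains k = false := by
        rw [PySem.Dict.contains_eq_decide_mem_keys]; simp [hk.2]
      simp [this]
  rw [hitems]
  apply PySem.List.sorted_eq_of_perm_of_pairwise_lt
  · exact hperm.map valPair
  · rw [List.pairwise_map]
    have hplow : lows.Pairwise (· < ·) :=
      pairwise_lt_of_le_nodup (PySem.List.sorted_pairwise _ _) hnlow
    have hphigh : highs.Pairwise (· < ·) :=
      pairwise_lt_of_le_nodup (PySem.List.sorted_pairwise _ _) hnhigh
    have hpRF : RF.Pairwise (· < ·) := PySem.List.pairwise_lt_pyRange_one 1 (h + 1)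
    have : (lows ++ RF ++ highs).Pairwise (· < ·) := by
      rw [List.pairwise_append, List.pairwise_append]
      refine ⟨⟨hplow, hpRF, ?_⟩, hphigh, ?_⟩
      · intro a ha b hb; rw [hmlow] at ha; rw [hmRF] at hb; omega
      · intro a ha b hb
        rw [hmhigh] at hb
        rcases (List.mem_append).mp ha with h' | h'
        · rw [hmlow] at h'; omega
        · rw [hmRF] at h'; omega
    exact this.imp (by intro a b hab; simpa [hvp])

theorem toStr_injective : Function.Injective PySem.Int.toStr := fun _ _ h => toStr_inj h

theorem assemble (F : PySem.Dict Int (List Int)) (hnd : F.keys.Nodup) (h W : Int) :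
    ((PySem.List.sorted ((PySem.List.pyRange 1 (h + 1) 1).foldl (gFill W) F).items
        (fun p => p.1) false).foldl
      (fun d p => d.insert (PySem.Int.toStr p.1) p.2)
      (PySem.Dict.empty : PySem.Dict String (List Int))).items
    = ((PySem.List.sorted (F.keys.filter (fun k => decide (k > max 0 h)))
          (fun k => k) false).foldl
        (fun d k => d.insert (PySem.Int.toStr k) (F.getD k []))
        ((PySem.List.pyRange 1 (h + 1) 1).foldl
          (fun d k => d.insert (PySem.Int.toStr k) (F.getD k [0, W + 1]))
          ((PySem.List.sorted (F.keys.filter (fun k => decide (k < 1))) (fun k => k) false).foldl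
            (fun d k => d.insert (PySem.Int.toStr k) (F.getD k []))
            (PySem.Dict.empty : PySem.Dict String (List Int))))).items := by
  set RF := PySem.List.pyRange 1 (h + 1) 1 with hRF
  set lows := PySem.List.sorted (F.keys.filter (fun k => decide (k < 1))) (fun k => k) false with hlows
  set highs := PySem.List.sorted (F.keys.filter (fun k => decide (k > max 0 h)))
    (fun k => k) false with hhighs
  have hmRF : ∀ k : Int, k ∈ RF ↔ 1 ≤ k ∧ k < h + 1 := fun k => PySem.List.mem_pyRange_one
  have hmlow : ∀ k : Int, k ∈ lows ↔ k ∈ F.keys ∧ k < 1 := by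
    intro k; rw [hlows, PySem.List.mem_sorted]; simp [List.mem_filter]
  have hmhigh : ∀ k : Int, k ∈ highs ↔ k ∈ F.keys ∧ max 0 h < k := by
    intro k; rw [hhighs, PySem.List.mem_sorted]; simp [List.mem_filter]
  have hnRF : RF.Nodup := PySem.List.nodup_pyRange_one 1 (h + 1)
  have hnlow : lows.Nodup := ((PySem.List.sorted_perm _ _ _).nodup_iff).mpr (hnd.filter _)
  have hnhigh : highs.Nodup := ((PySem.List.sorted_perm _ _ _).nodup_iff).mpr (hnd.filter _)
  have hnKR : (lows ++ RF ++ highs).Nodup := by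
    rw [List.nodup_append, List.nodup_append]
    refine ⟨⟨hnlow, hnRF, ?_⟩, hnhigh, ?_⟩
    · intro a ha b hb
      rw [hmlow] at ha; rw [hmRF] at hb; omega
    · intro a ha b hb
      rw [hmhigh] at hb
      rcases (List.mem_append).mp ha with h' | h'
      · rw [hmlow] at h'; omega
      · rw [hmRF] at h'; omega
  -- left side: one fold over the sorted pair list, all keys fresh
  rw [sorted_eq_keys F hnd h W]
  have hmain := PySem.Dict.items_foldl_insert_fresh
    ((lows ++ RF ++ highs).map (fun k => (k, if F.contains k then F.getD k [] else [0, W + 1])))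
    (fun p : Int × List Int => PySem.Int.toStr p.1) (fun p : Int × List Int => p.2)
    (PySem.Dict.empty : PySem.Dict String (List Int))
    (fun a _ => PySem.Dict.contains_empty _)
    (by rw [List.map_map]; exact hnKR.map toStr_injective)
  rw [hmain]
  -- right side: three folds over fresh keys
  have h1 : ((lows.foldl (fun d k => d.insert (PySem.Int.toStr k) (F.getD k []))
      (PySem.Dict.empty : PySem.Dict String (List Int)))).items
      = lows.map (fun k => (PySem.Int.toStr k, F.getD k [])) := by
    simp only [PySem.Dict.items_foldl_insert_fresh lows (fun k => PySem.Int.toStr k) _ _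
      (fun a _ => PySem.Dict.contains_empty _) (hnlow.map toStr_injective)]
    simp [show (PySem.Dict.empty : PySem.Dict String (List Int)).items = [] from rfl]
  have hk1 : ((lows.foldl (fun d k => d.insert (PySem.Int.toStr k) (F.getD k []))
      (PySem.Dict.empty : PySem.Dict String (List Int)))).keys
      = lows.map PySem.Int.toStr := by
    simp only [PySem.Dict.keys, h1, List.map_map]; rfl
  have hfresh2 : ∀ k ∈ RF, ((lows.foldl (fun d k => d.insert (PySem.Int.toStr k) (F.getD k []))
      (PySem.Dict.empty : PySem.Dict String (List Int)))).contains (PySem.Int.toStr k) = false := by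
    intro k hk
    rw [PySem.Dict.contains_eq_decide_mem_keys, hk1]
    simp only [decide_eq_false_iff_not]
    intro hmem
    rcases List.mem_map.mp hmem with ⟨a, ha, heq⟩
    have := toStr_inj heq
    rw [hmlow] at ha; rw [hmRF] at hk; omega
  have h2 : ((RF.foldl (fun d k => d.insert (PySem.Int.toStr k) (F.getD k [0, W + 1]))
      ((lows.foldl (fun d k => d.insert (PySem.Int.toStr k) (F.getD k []))
        (PySem.Dict.empty : PySem.Dict String (List Int)))))).items
      = lows.map (fun k => (PySem.Int.toStr k, F.getD k []))
        ++ RF.map (fun k => (PySem.Int.toStr k, F.getD k [0, W + 1])) := by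
    simp only [PySem.Dict.items_foldl_insert_fresh RF (fun k => PySem.Int.toStr k) _ _
      hfresh2 (hnRF.map toStr_injective), h1]
  have hk2 : ((RF.foldl (fun d k => d.insert (PySem.Int.toStr k) (F.getD k [0, W + 1]))
      ((lows.foldl (fun d k => d.insert (PySem.Int.toStr k) (F.getD k []))
        (PySem.Dict.empty : PySem.Dict String (List Int)))))).keys
      = lows.map PySem.Int.toStr ++ RF.map PySem.Int.toStr := by
    simp only [PySem.Dict.keys, h2, List.map_append, List.map_map]; rfl
  have hfresh3 : ∀ k ∈ highs,
      ((RF.foldl (fun d k => d.insert (PySem.Int.toStr k) (F.getD k [0, W + 1]))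
        ((lows.foldl (fun d k => d.insert (PySem.Int.toStr k) (F.getD k []))
          (PySem.Dict.empty : PySem.Dict String (List Int)))))).contains (PySem.Int.toStr k)
        = false := by
    intro k hk
    rw [PySem.Dict.contains_eq_decide_mem_keys, hk2]
    simp only [decide_eq_false_iff_not, List.mem_append]
    rintro (hmem | hmem) <;>
      (rcases List.mem_map.mp hmem with ⟨a, ha, heq⟩
       have := toStr_inj heq
       rw [hmhigh] at hk)
    · rw [hmlow] at ha; omega
    · rw [hmRF] at ha; omega
  simp only [PySem.Dict.items_foldl_insert_fresh highs (fun k => PySem.Int.toStr k) _ _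
    hfresh3 (hnhigh.map toStr_injective), h2]
  -- both sides are now concatenations of per-segment maps
  simp only [show (PySem.Dict.empty : PySem.Dict String (List Int)).items = [] from rfl,
    List.nil_append, List.map_append, List.map_map]
  congr 1
  · congr 1
    · apply List.map_congr_left
      intro k hk
      rw [hmlow] at hk
      have hc : F.contains k = true := (PySem.Dict.contains_iff_mem_keys F k).mpr hk.1
      simp [Function.comp, hc]
    · apply List.map_congr_left
      intro k _
      by_cases hc : F.contains k = true
      · cases hq : F.get? k with
        | none =>
          rw [PySem.Dict.contains_eq_isSome_get?, hq] at hc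
          simp at hc
        | some v =>
          simp [Function.comp, hc, PySem.Dict.getD_of_get?_eq_some _ _ hq]
      · have hc' : F.contains k = false := by simpa using hc
        simp [Function.comp, hc', PySem.Dict.getD_of_not_contains _ _ hc']
  · apply List.map_congr_left
    intro k hk
    rw [hmhigh] at hk
    have hc : F.contains k = true := (PySem.Dict.contains_iff_mem_keys F k).mpr hk.1
    simp [Function.comp, hc]

-- the ports are total (free_range[0]/free_range[1] are ported as pyGetD, exact under Pre_);
-- the agreement proof uses only 0 ≤ agent_size when no_crashes is false.
theorem main_eq (list_of_free_ranges : List (List Int)) (world_y_height world_x_width agent_size : Int) (no_crashes : Bool)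
    (hag : no_crashes = false → 0 ≤ agent_size) :
    create_dict_of_world_walls list_of_free_ranges world_y_height world_x_width agent_size no_crashes
      = create_dict_of_world_walls_alt list_of_free_ranges world_y_height world_x_width agent_size no_crashes := by
  simp only [create_dict_of_world_walls, create_dict_of_world_walls_alt]
  have hA1 : (if !no_crashes then
        list_of_free_ranges.foldl (aRange world_x_width agent_size) PySem.Dict.empty
      else PySem.Dict.empty)
      = mapd (if !no_crashes then
          list_of_free_ranges.foldl
            (bRange world_x_width (max 0 (PySem.Int.floordiv (world_x_width - 1 - agent_size) 2 + 1)))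
            PySem.Dict.empty
        else PySem.Dict.empty) := by
    cases no_crashes
    · simp only [Bool.not_false, if_true]
      have hfun : gRange world_x_width agent_size
          = bRange world_x_width (max 0 (PySem.Int.floordiv (world_x_width - 1 - agent_size) 2 + 1)) :=
        funext fun d => funext fun fr => gRange_eq_bRange _ _ (hag rfl) d fr
      rw [← hfun,
        show (PySem.Dict.empty : PySem.Dict String (List Int)) = mapd PySem.Dict.empty from rfl,
        foldl_aRange_mapd]
    · rfl
  rw [hA1, fill_mapd]
  set F := (if !no_crashes then
      list_of_free_ranges.foldl
        (bRange world_x_width (max 0 (PySem.Int.floordiv (world_x_width - 1 - agent_size) 2 + 1)))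
        PySem.Dict.empty
    else PySem.Dict.empty) with hF
  have nodupF : F.keys.Nodup := by
    rw [hF]; cases no_crashes
    · simp only [Bool.not_false, if_true]
      exact nodup_keys_foldl_bRange _ _ _ _ PySem.Dict.nodup_keys_empty
    · exact PySem.Dict.nodup_keys_empty
  set X := (PySem.List.pyRange 1 (world_y_height + 1) 1).foldl (gFill world_x_width) F with hX
  have nodupX : X.keys.Nodup := by
    have hXitems := fill_items world_x_width (PySem.List.pyRange 1 (world_y_height + 1) 1) F
      (PySem.List.nodup_pyRange_one 1 (world_y_height + 1))
    have hXkeys : X.keys = F.keys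
        ++ (PySem.List.pyRange 1 (world_y_height + 1) 1).filter (fun k => !F.contains k) := by
      simp only [PySem.Dict.keys, hX, hXitems, List.map_append, List.map_map]
      congr 1
      exact List.map_id _
    rw [hXkeys, List.nodup_append]
    refine ⟨nodupF, (PySem.List.nodup_pyRange_one 1 (world_y_height + 1)).filter _, ?_⟩
    intro a ha b hb
    rcases List.mem_filter.mp hb with ⟨_, hb2⟩
    rintro rfl
    rw [Bool.not_eq_true'] at hb2
    rw [← PySem.Dict.contains_iff_mem_keys, hb2] at ha
    exact absurd ha (by simp)
  have hintd : (mapd X).items.foldl (fun d p => d.insert (pvIntOfStr p.1) p.2)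
      (PySem.Dict.empty : PySem.Dict Int (List Int)) = X := by
    rw [mapd_items, List.foldl_map]
    have hfn : (fun (d : PySem.Dict Int (List Int)) (p : Int × List Int) =>
        d.insert (pvIntOfStr (PySem.Int.toStr p.1)) p.2) = fun d p => d.insert p.1 p.2 := by
      funext d p; rw [pvIntOfStr_toStr]
    rw [hfn]
    exact rebuild X nodupX
  rw [hintd]
  exact assemble F nodupF world_y_height world_x_width

-- ===== VERDICT (by name: the statement is the Claim_ definition above) =====
theorem create_dict_of_world_walls_spec : Claim_equal_create_dict_of_world_walls := by
  intro rs h W ag nc _ hpre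
  refine main_eq rs h W ag nc ?_
  intro hnc
  rcases hpre with h' | h'
  · rw [h'] at hnc; cases hnc
  · exact h'.1
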